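-- pv_equiv track=rewrite | github.com/Coder-015/Dhurandar_AI | backend/engine/correlation.py | _is_after_hours
-- ===== SOURCE A (Python) =====
-- from typing import Any, Callable
--
-- def _is_after_hours(user: dict[str, Any]) -> bool:
--     """True if flagged login text mentions an unusual hour (0–6 AM)."""
--     for entry in user.get("flagged_logins", []):
--         if isinstance(entry, str):
--             lower = entry.lower()
--             if "login at 0" in lower or "login at 1" in lower or \
--                "login at 2" in lower or "login at 3" in lower or \
--                "login at 4" in lower or "login at 5" in lower or \
--                "login at 6:" in lower or "3am" in lower or "3 am" in lower:
--                 return True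
--     return False
-- ===== SOURCE B (Python) =====
-- def _is_after_hours(user):
--     """True if flagged login text mentions an unusual hour (0-6 AM)."""
--     for entry in user.get("flagged_logins", []):
--         if isinstance(entry, str):
--             s = entry.lower()
--             n = len(s)
--             for i in range(n):
--                 if s.startswith("login at ", i):
--                     j = i + 9
--                     if j < n and (s[j] in "012345" or (s[j] == "6" and j + 1 < n and s[j + 1] == ":")):
--                         return True
--                 if s.startswith("3am", i) or s.startswith("3 am", i):
--                     return True
--     return False
-- ===== Notes on version B (the rewrite author's own statement) =====
-- stated objective: alternative
-- what changed: A runs nine independent whole-string substring searches per entry; B makes a single left-to-right scan over each lowered entry, testing the three pattern shapes ('login at ' + digit 0-5 or '6:', '3am', '3 am') at every position.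
import Mathlib
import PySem

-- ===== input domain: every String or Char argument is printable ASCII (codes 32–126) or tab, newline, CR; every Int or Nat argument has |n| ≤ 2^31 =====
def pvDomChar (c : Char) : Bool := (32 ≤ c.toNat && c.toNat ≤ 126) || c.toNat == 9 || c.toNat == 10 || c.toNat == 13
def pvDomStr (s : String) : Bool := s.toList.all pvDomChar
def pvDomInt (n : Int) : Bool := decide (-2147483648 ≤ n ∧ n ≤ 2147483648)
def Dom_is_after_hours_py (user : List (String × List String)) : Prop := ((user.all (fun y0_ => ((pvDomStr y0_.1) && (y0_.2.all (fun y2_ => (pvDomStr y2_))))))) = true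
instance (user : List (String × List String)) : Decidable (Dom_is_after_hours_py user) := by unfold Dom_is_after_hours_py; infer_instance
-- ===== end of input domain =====

-- B replaces A's nine whole-string substring searches per entry by a single left-to-right
-- scan of each lowered entry that tests the patterns at every position (objective: alternative).

-- ===== PORT A =====
-- for entry in user.get("flagged_logins", []): if <substring chain>: return True / return False
def is_after_hours_py (user : List (String × List String)) : Bool :=
  ((PySem.Dict.ofList user).getD "flagged_logins" []).any fun entry =>
    -- isinstance(entry, str) is always true under the type convention
    let lower := PySem.Str.lower entry
    PySem.Str.isIn "login at 0" lower || PySem.Str.isIn "login at 1" lower ||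
    PySem.Str.isIn "login at 2" lower || PySem.Str.isIn "login at 3" lower ||
    PySem.Str.isIn "login at 4" lower || PySem.Str.isIn "login at 5" lower ||
    PySem.Str.isIn "login at 6:" lower || PySem.Str.isIn "3am" lower ||
    PySem.Str.isIn "3 am" lower

-- ===== PORT B =====
-- s[j] in "012345" or (s[j] == "6" and s[j+1] == ":")   (the j+1 < n guard is the pattern match)
def pvNextOk : List Char → Bool
  | [] => false
  | c :: rest =>
    "012345".toList.contains c ||
    (c == '6' && (match rest with | ':' :: _ => true | _ => false))

-- the inner 'for i in range(n)' of Source B: test the three patterns at each position, else move on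
def pvScan : List Char → Bool
  | [] => false
  | c :: rest =>
    (("login at ".toList.isPrefixOf (c :: rest) && pvNextOk ((c :: rest).drop 9)) ||
     "3am".toList.isPrefixOf (c :: rest) || "3 am".toList.isPrefixOf (c :: rest)) ||
    pvScan rest

def is_after_hours_py_alt (user : List (String × List String)) : Bool :=
  ((PySem.Dict.ofList user).getD "flagged_logins" []).any fun entry =>
    pvScan (PySem.Chars.lower entry.toList)

-- ===== PRECONDITION & SPEC =====
def Spec_is_after_hours_py (user : List (String × List String)) (out : Bool) : Prop := out = is_after_hours_py_alt user
instance (user : List (String × List String)) (out : Bool) : Decidable (Spec_is_after_hours_py user out) := by unfold Spec_is_after_hours_py; infer_instance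

-- ===== CLAIM (what is proved, stated in full; the proofs are below) =====
def Claim_equal_is_after_hours_py : Prop := ∀ (user : List (String × List String)), Dom_is_after_hours_py user → Spec_is_after_hours_py user (is_after_hours_py user)

-- ===== LEMMAS AND PROOFS =====

-- the per-position test of pvScan, named for the proofs
def pvCheck (t : List Char) : Bool :=
  ("login at ".toList.isPrefixOf t && pvNextOk (t.drop 9)) ||
  "3am".toList.isPrefixOf t || "3 am".toList.isPrefixOf t

lemma pvScan_eq_check_or (c : Char) (rest : List Char) :
    pvScan (c :: rest) = (pvCheck (c :: rest) || pvScan rest) := rfl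

lemma pvScan_iff (s : List Char) :
    pvScan s = true ↔ ∃ t, t <:+ s ∧ pvCheck t = true := by
  induction s with
  | nil =>
    constructor
    · intro h; exact absurd h (by decide)
    · rintro ⟨t, ht, hc⟩
      rw [List.suffix_nil] at ht
      subst ht
      exact absurd hc (by decide)
  | cons c rest ih =>
    rw [pvScan_eq_check_or]
    simp only [Bool.or_eq_true, ih]
    constructor
    · rintro (h | ⟨t, ht, hc⟩)
      · exact ⟨c :: rest, List.suffix_refl _, h⟩
      · exact ⟨t, ht.trans (List.suffix_cons c rest), hc⟩
    · rintro ⟨t, ht, hc⟩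
      rcases List.suffix_cons_iff.mp ht with h | h
      · subst h; exact Or.inl hc
      · exact Or.inr ⟨t, h, hc⟩

set_option maxHeartbeats 1000000 in
lemma pvNextOk_iff (u : List Char) :
    pvNextOk u = true ↔
      (['0'] <+: u ∨ ['1'] <+: u ∨ ['2'] <+: u ∨ ['3'] <+: u ∨
       ['4'] <+: u ∨ ['5'] <+: u ∨ ['6', ':'] <+: u) := by
  have hsix : "012345".toList = ['0', '1', '2', '3', '4', '5'] := by decide
  cases u with
  | nil => simp [pvNextOk, List.prefix_nil]
  | cons c rest =>
    cases rest with
    | nil =>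
      simp [pvNextOk, hsix, List.cons_prefix_cons, List.prefix_nil]
      tauto
    | cons d rest' =>
      simp [pvNextOk, hsix, List.cons_prefix_cons]
      by_cases hd : d = ':' <;> simp [hd] <;> tauto

lemma pvCheck_iff (t : List Char) :
    pvCheck t = true ↔
      ("login at 0".toList <+: t ∨ "login at 1".toList <+: t ∨
       "login at 2".toList <+: t ∨ "login at 3".toList <+: t ∨
       "login at 4".toList <+: t ∨ "login at 5".toList <+: t ∨
       "login at 6:".toList <+: t ∨ "3am".toList <+: t ∨ "3 am".toList <+: t) := by
  have hdrop : ∀ v : List Char, ("login at ".toList ++ v).drop 9 = v := by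
    intro v
    rw [show (9 = "login at ".toList.length) from by decide, List.drop_left]
  have hsplit : ∀ x : List Char,
      ("login at ".toList ++ x) <+: t ↔
        "login at ".toList <+: t ∧ x <+: t.drop 9 := by
    intro x
    constructor
    · rintro ⟨u, rfl⟩
      have hassoc : ("login at ".toList ++ x) ++ u = "login at ".toList ++ (x ++ u) :=
        List.append_assoc _ _ _
      rw [hassoc, hdrop]
      exact ⟨⟨x ++ u, rfl⟩, ⟨u, rfl⟩⟩
    · rintro ⟨⟨v, rfl⟩, hx⟩
      rw [hdrop] at hx
      rcases hx with ⟨w, rfl⟩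
      exact ⟨w, List.append_assoc _ _ _⟩
  have h0 : "login at 0".toList = "login at ".toList ++ ['0'] := by decide
  have h1 : "login at 1".toList = "login at ".toList ++ ['1'] := by decide
  have h2 : "login at 2".toList = "login at ".toList ++ ['2'] := by decide
  have h3 : "login at 3".toList = "login at ".toList ++ ['3'] := by decide
  have h4 : "login at 4".toList = "login at ".toList ++ ['4'] := by decide
  have h5 : "login at 5".toList = "login at ".toList ++ ['5'] := by decide
  have h6 : "login at 6:".toList = "login at ".toList ++ ['6', ':'] := by decide
  rw [h0, h1, h2, h3, h4, h5, h6]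
  simp only [hsplit]
  unfold pvCheck
  simp only [Bool.or_eq_true, Bool.and_eq_true, List.isPrefixOf_iff_prefix, pvNextOk_iff,
    and_or_left, or_assoc]

lemma pvEntry_eq (s : List Char) :
    (PySem.Chars.isIn "login at 0".toList s || PySem.Chars.isIn "login at 1".toList s ||
     PySem.Chars.isIn "login at 2".toList s || PySem.Chars.isIn "login at 3".toList s ||
     PySem.Chars.isIn "login at 4".toList s || PySem.Chars.isIn "login at 5".toList s ||
     PySem.Chars.isIn "login at 6:".toList s || PySem.Chars.isIn "3am".toList s ||
     PySem.Chars.isIn "3 am".toList s) = pvScan s := by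
  rw [Bool.eq_iff_iff]
  simp only [Bool.or_eq_true, PySem.Chars.isIn_iff_infix, List.infix_iff_prefix_suffix,
    pvScan_iff, pvCheck_iff, and_or_left, exists_or, or_assoc, and_comm]

-- ===== VERDICT (by name: the statement is the Claim_ definition above) =====
theorem is_after_hours_py_spec : Claim_equal_is_after_hours_py := by
  intro user _
  unfold Spec_is_after_hours_py is_after_hours_py is_after_hours_py_alt
  congr 1
  funext entry
  simp only [PySem.Str.isIn_eq, PySem.Str.toList_lower]
  exact pvEntry_eq (PySem.Chars.lower entry.toList)
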